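-- pv_equiv track=rewrite | github.com/julie-oh/Algorithm-study-julie | python/programmers/sign.py | solution
-- ===== SOURCE A (Python) =====
-- def solution(phrases, second):
--     total = len(phrases) + 14
--     sign = ['_' for _ in range(0,total)]
--
--     if total-second < 0:
--         start = total-second % total
--     else:
--         start = total-second
--
--     p_i = 0
--     for i in range(start, total):
--         if p_i >= len(phrases):
--             break
--
--         sign[i] = phrases[p_i]
--         p_i += 1
--
--     return ''.join(sign[len(phrases):])
-- ===== SOURCE B (Python) =====
-- def solution(phrases, second):
--     n = len(phrases)
--     total = n + 14
--     if total - second < 0: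
--         start = total - second % total
--     else:
--         start = total - second
--     # window coordinates j in [0,14): sign position n+j; filled when start <= n+j < start+n
--     j0 = min(14, max(0, start - n))
--     j1 = min(14, start)
--     mid = phrases[j0 + n - start: j1 + n - start] if j0 < j1 else ''
--     return '_' * j0 + mid + '_' * (14 - j0 - len(mid))
-- ===== Notes on version B (the rewrite author's own statement) =====
-- stated objective: simpler
-- what changed: B drops A's size-(len+14) underscore array and per-character placement loop entirely: it computes the overlap of the 14-slot output window with the phrase by boundary arithmetic (j0/j1), takes one slice of phrases, and pads both sides with underscores.
import Mathlib
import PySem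

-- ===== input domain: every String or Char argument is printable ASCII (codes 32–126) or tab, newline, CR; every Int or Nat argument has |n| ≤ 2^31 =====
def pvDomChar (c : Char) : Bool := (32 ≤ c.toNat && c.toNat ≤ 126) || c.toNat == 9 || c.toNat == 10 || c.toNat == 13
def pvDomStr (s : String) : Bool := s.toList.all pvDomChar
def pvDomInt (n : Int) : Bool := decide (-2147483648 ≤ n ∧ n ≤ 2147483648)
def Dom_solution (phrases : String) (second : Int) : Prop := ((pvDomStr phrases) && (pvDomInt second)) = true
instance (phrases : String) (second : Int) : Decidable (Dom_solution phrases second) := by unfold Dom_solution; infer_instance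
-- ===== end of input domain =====

-- B replaces A's char-by-char placement into a full size-`total` array by boundary
-- arithmetic plus one slice of `phrases`, building the 14-char answer directly (objective: simpler).

-- ===== PORT A =====
-- the `for i in range(start, total)` loop: state = (sign, p_i), `break` returns sign
def fillA (cs : List Char) : List Int → List Char → Nat → List Char
  | [], sign, _ => sign
  | i :: rest, sign, p =>
    if p ≥ cs.length then sign
    else fillA cs rest (PySem.List.pySetD sign i (PySem.List.pyGetD cs (p : Int) ' ')) (p + 1)

def solution (phrases : String) (second : Int) : String :=
  let cs := phrases.toList
  let total : Int := (cs.length : Int) + 14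
  let sign : List Char := (PySem.List.pyRange 0 total 1).map (fun _ => '_')
  let start : Int := if total - second < 0 then total - PySem.Int.mod second total else total - second
  let sign' := fillA cs (PySem.List.pyRange start total 1) sign 0
  String.ofList (PySem.List.slice sign' (some (cs.length : Int)) none)

-- ===== PORT B =====
def solution_alt (phrases : String) (second : Int) : String :=
  let cs := phrases.toList
  let n : Int := (cs.length : Int)
  let total : Int := n + 14
  let start : Int := if total - second < 0 then total - PySem.Int.mod second total else total - second
  let j0 : Int := min 14 (max 0 (start - n))
  let j1 : Int := min 14 start
  let mid : List Char :=
    if j0 < j1 then PySem.List.slice cs (some (j0 + n - start)) (some (j1 + n - start)) else []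
  String.ofList (List.replicate j0.toNat '_' ++ mid ++ List.replicate (14 - j0.toNat - mid.length) '_')

-- ===== PRECONDITION & SPEC =====
def Spec_solution (phrases : String) (second : Int) (out : String) : Prop := out = solution_alt phrases second
instance (phrases : String) (second : Int) (out : String) : Decidable (Spec_solution phrases second out) := by unfold Spec_solution; infer_instance

-- ===== CLAIM (what is proved, stated in full; the proofs are below) =====
def Claim_equal_solution : Prop := ∀ (phrases : String) (second : Int), Dom_solution phrases second → Spec_solution phrases second (solution phrases second)

-- ===== LEMMAS AND PROOFS =====

theorem set_take_succ {α : Type} (l : List α) (k : Nat) (c : α) (h : k < l.length) :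
    (l.set k c).take (k+1) = l.take k ++ [c] := by
  induction l generalizing k with
  | nil => simp at h
  | cons a l ih =>
    cases k with
    | zero => simp
    | succ k =>
      simp only [List.set_cons_succ, List.take_succ_cons, List.cons_append]
      rw [ih k (by simpa using h)]

theorem set_drop_of_lt {α : Type} (l : List α) (k j : Nat) (c : α) (h : k < j) :
    (l.set k c).drop j = l.drop j := by
  induction l generalizing k j with
  | nil => simp
  | cons a l ih =>
    cases j with
    | zero => omega
    | succ j =>
      cases k with
      | zero => simp
      | succ k =>
        simp only [List.set_cons_succ, List.drop_succ_cons]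
        exact ih k j (by omega)

theorem map_const_replicate {α β : Type} (l : List α) (b : β) :
    l.map (fun _ => b) = List.replicate l.length b := by
  induction l with
  | nil => rfl
  | cons a l ih => simp [ih, List.replicate_succ]

theorem drop_append_helper {α : Type} (l₁ l₂ : List α) (n : Nat) :
    (l₁ ++ l₂).drop n = l₁.drop n ++ l₂.drop (n - l₁.length) := by
  induction l₁ generalizing n with
  | nil => simp
  | cons a l ih =>
    cases n with
    | zero => simp
    | succ n => simp [ih]

theorem repl_congr (a a' c c' : Nat) (y y' : List Char) (h1 : a = a') (h2 : y = y') (h3 : c = c') :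
    List.replicate a '_' ++ y ++ List.replicate c '_' = List.replicate a' '_' ++ y' ++ List.replicate c' '_' := by
  subst h1; subst h2; subst h3; rfl

-- the loop fills positions s, s+1, … of `sign` with cs[p], cs[p+1], … until p runs out or the range ends
theorem fillA_spec (cs : List Char) (t : Int) :
    ∀ (k : Nat) (s : Int) (p : Nat) (sign : List Char),
    (t - s).toNat = k → 0 ≤ s → p ≤ cs.length → sign.length = t.toNat →
    fillA cs (PySem.List.pyRange s t 1) sign p =
      sign.take s.toNat ++ (cs.drop p).take ((t.toNat - s.toNat) ⊓ (cs.length - p)) ++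
        sign.drop (s.toNat + ((t.toNat - s.toNat) ⊓ (cs.length - p))) := by
  intro k
  induction k with
  | zero =>
    intro s p sign hk hs hp hlen
    rw [PySem.List.pyRange_one_eq_nil (by omega)]
    have h0 : (t.toNat - s.toNat) ⊓ (cs.length - p) = 0 := by omega
    have hts : sign.length ≤ s.toNat := by omega
    have hd : List.drop (s.toNat + 0) sign = [] := List.drop_eq_nil_of_le (by omega)
    rw [h0]
    simp [fillA, List.take_of_length_le hts]
    omega
  | succ k ih =>
    intro s p sign hk hs hp hlen
    have hst : s < t := by omega
    rw [PySem.List.pyRange_one_cons hst]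
    by_cases hpc : cs.length ≤ p
    · have hp' : p = cs.length := by omega
      subst hp'
      have h0 : (t.toNat - s.toNat) ⊓ (cs.length - cs.length) = 0 := by omega
      simp [fillA]
    · replace hpc : p < cs.length := by omega
      have hset : PySem.List.pySetD sign s (cs[p]?.getD ' ') = sign.set s.toNat (cs[p]?.getD ' ') := by
        simp [PySem.List.pySetD_of_nonneg, hs]
      have step : fillA cs (s :: PySem.List.pyRange (s+1) t 1) sign p
          = fillA cs (PySem.List.pyRange (s+1) t 1) (sign.set s.toNat (cs[p]?.getD ' ')) (p+1) := by
        simp [fillA, Nat.not_le.2 hpc, hset]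
      rw [step, ih (s+1) (p+1) _ (by omega) (by omega) (by omega) (by simp [hlen])]
      have h1 : (s+1).toNat = s.toNat + 1 := by omega
      rw [h1]
      have hm : (t.toNat - s.toNat) ⊓ (cs.length - p)
          = ((t.toNat - (s.toNat+1)) ⊓ (cs.length - (p+1))) + 1 := by omega
      rw [hm]
      have hslen : s.toNat < sign.length := by omega
      rw [set_take_succ sign s.toNat _ hslen, set_drop_of_lt sign s.toNat _ _ (by omega)]
      rw [List.drop_eq_getElem_cons hpc, List.take_succ_cons]
      rw [List.getElem?_eq_getElem hpc]
      simp only [Option.getD_some]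
      have h2 : s.toNat + 1 + ((t.toNat - (s.toNat+1)) ⊓ (cs.length - (p+1)))
          = s.toNat + ((t.toNat - (s.toNat+1)) ⊓ (cs.length - (p+1)) + 1) := by omega
      rw [h2]
      simp [List.append_assoc]

-- equality of the two "cores" for any nonnegative start value
theorem core (cs : List Char) (start : Int) (hs : 0 ≤ start) :
    String.ofList (PySem.List.slice
        (fillA cs (PySem.List.pyRange start ((cs.length : Int) + 14) 1)
          ((PySem.List.pyRange 0 ((cs.length : Int) + 14) 1).map (fun _ => '_')) 0)
        (some (cs.length : Int)) none)
    = String.ofList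
        (List.replicate (min 14 (max 0 (start - (cs.length : Int)))).toNat '_' ++
          (if min 14 (max 0 (start - (cs.length : Int))) < min 14 start then
              PySem.List.slice cs (some (min 14 (max 0 (start - (cs.length : Int))) + (cs.length : Int) - start))
                (some (min 14 start + (cs.length : Int) - start))
            else []) ++
          List.replicate (14 - (min 14 (max 0 (start - (cs.length : Int)))).toNat -
            (if min 14 (max 0 (start - (cs.length : Int))) < min 14 start then
              PySem.List.slice cs (some (min 14 (max 0 (start - (cs.length : Int))) + (cs.length : Int) - start))
                (some (min 14 start + (cs.length : Int) - start))
            else []).length) '_') := by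
  obtain ⟨sN, rfl⟩ : ∃ k : Nat, (k : Int) = start := ⟨start.toNat, Int.toNat_of_nonneg hs⟩
  rw [map_const_replicate]
  have hlenrange : (PySem.List.pyRange 0 ((cs.length : Int) + 14) 1).length = cs.length + 14 := by
    rw [PySem.List.length_pyRange_one]; omega
  rw [hlenrange]
  rw [fillA_spec cs ((cs.length : Int) + 14) ((((cs.length : Int) + 14) - (sN : Int)).toNat) (sN : Int) 0
        (List.replicate (cs.length + 14) '_') rfl (by positivity) (Nat.zero_le _)
        (by simp; omega)]
  rw [PySem.List.slice_from_natCast]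
  have htn : (((cs.length : Int) + 14)).toNat = cs.length + 14 := by omega
  rw [htn]
  simp only [Int.toNat_natCast, Nat.sub_zero, List.drop_zero]
  congr 1
  by_cases h1 : cs.length + 14 ≤ sN
  · -- start past the whole sign: all underscores
    have hm : min (cs.length + 14 - sN) cs.length = 0 := by omega
    rw [hm]
    have hj0 : min (14:Int) (max 0 ((sN:Int) - (cs.length:Int))) = 14 := by omega
    rw [hj0]
    rw [if_neg (show ¬((14:Int) < min 14 ((sN:Int))) by omega)]
    rw [List.take_of_length_le (show (List.replicate (cs.length+14) '_').length ≤ sN by simp [List.length_replicate]; omega),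
        List.drop_eq_nil_of_le (show (List.replicate (cs.length+14) '_').length ≤ sN + 0 by simp [List.length_replicate]; omega)]
    simp [List.drop_replicate]
  · by_cases h2 : cs.length ≤ sN
    · -- phrase window starts inside the 14 slots
      rw [List.take_replicate, List.drop_replicate]
      rw [show min sN (cs.length + 14) = sN from by omega]
      rw [drop_append_helper, drop_append_helper]
      simp only [List.length_append, List.length_replicate, List.length_take, List.drop_replicate]
      rw [show cs.length - sN = 0 from by omega, List.drop_zero]
      rw [show min 14 (max 0 ((sN:Int) - (cs.length:Int))) = (((sN - cs.length : Nat) : Nat) : Int) from by omega]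
      by_cases hj : ((((sN - cs.length : Nat) : Nat) : Int) < min 14 (sN:Int))
      · rw [if_pos hj]
        rw [show (((sN - cs.length : Nat) : Nat) : Int) + (cs.length:Int) - (sN:Int) = ((0:Nat) : Int) from by omega]
        rw [show min 14 (sN:Int) + (cs.length:Int) - (sN:Int) = ((min (cs.length + 14 - sN) cs.length : Nat) : Int) from by omega]
        rw [PySem.List.slice_natCast]
        simp only [List.drop_zero, Nat.sub_zero, Int.toNat_natCast, List.length_take]
        exact repl_congr _ _ _ _ _ _ (by omega) rfl (by omega)
      · rw [if_neg hj]
        have hL : cs.length = 0 := by omega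
        have hcs : cs = [] := List.length_eq_zero_iff.mp hL
        subst hcs
        simp only [List.length_nil, Int.toNat_natCast]
        exact repl_congr _ _ _ _ _ _ (by omega) (by simp) (by simp)
    · -- phrase window starts inside the phrase prefix
      rw [List.take_replicate, List.drop_replicate]
      rw [show min sN (cs.length + 14) = sN from by omega]
      rw [drop_append_helper, drop_append_helper]
      simp only [List.length_append, List.length_replicate, List.length_take, List.drop_replicate]
      rw [show min 14 (max 0 ((sN:Int) - (cs.length:Int))) = (((0:Nat)) : Int) from by omega]
      by_cases hj : (((0:Nat) : Int) < min 14 (sN:Int))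
      · rw [if_pos hj]
        rw [show ((0:Nat) : Int) + (cs.length:Int) - (sN:Int) = ((cs.length - sN : Nat) : Int) from by omega]
        rw [show min 14 (sN:Int) + (cs.length:Int) - (sN:Int) = ((min (cs.length + 14 - sN) cs.length : Nat) : Int) from by omega]
        rw [PySem.List.slice_natCast]
        rw [List.drop_take]
        simp only [Int.toNat_natCast, List.length_take, List.length_drop]
        congr 1
        · congr 2
          omega
        · congr 1
          omega
      · rw [if_neg hj]
        have hsN0 : sN = 0 := by omega
        subst hsN0
        simp only [Int.toNat_natCast]
        refine repl_congr _ _ _ _ _ _ (by omega) ?_ (by simp)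
        apply List.drop_eq_nil_of_le
        simp

-- ===== VERDICT (by name: the statement is the Claim_ definition above) =====
theorem solution_spec : Claim_equal_solution := by
  intro phrases second _
  unfold Spec_solution solution solution_alt
  simp only []
  by_cases hc : ((phrases.toList.length : Int) + 14 - second < 0)
  · have hmodpos : 0 < (phrases.toList.length : Int) + 14 := by positivity
    have h1 : 0 ≤ PySem.Int.mod second ((phrases.toList.length : Int) + 14) := by
      rw [PySem.Int.mod_eq_emod_of_pos hmodpos]
      exact Int.emod_nonneg second (by omega)
    have h2 : PySem.Int.mod second ((phrases.toList.length : Int) + 14) < (phrases.toList.length : Int) + 14 := by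
      rw [PySem.Int.mod_eq_emod_of_pos hmodpos]
      exact Int.emod_lt_of_pos second hmodpos
    rw [if_pos hc]
    exact core phrases.toList _ (by omega)
  · rw [if_neg hc]
    exact core phrases.toList _ (by omega)
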